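-- pv_equiv track=rewrite | github.com/birc-gsa-2022/project-3-python-armando-christian-perez | src/sa.py | impute_buckets
-- ===== SOURCE A (Python) =====
-- def impute_buckets(string):
--     buckets = {}
--     for i in range(len(string)):
--         if string[i] in buckets:
--             buckets[string[i]].append(i)
--         else:
--             buckets[string[i]] = [i]
--     buckets = dict(sorted(buckets.items()))
--     return buckets
-- ===== SOURCE B (Python) =====
-- def impute_buckets(string):
--     # Sort all indices by their character (stable, so indices stay ascending
--     # within each character), then cut the sorted index list into runs of
--     # equal characters; keys emerge already in sorted order.
--     order = sorted(range(len(string)), key=lambda i: string[i])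
--     groups = []
--     for i in order:
--         c = string[i]
--         if groups and groups[-1][0] == c:
--             groups[-1][1].append(i)
--         else:
--             groups.append((c, [i]))
--     return dict(groups)
-- ===== Notes on version B (the rewrite author's own statement) =====
-- stated objective: alternative
-- what changed: Replaces the build-dict-by-appending-then-sort-keys strategy with a sort-all-indices-by-character (stable) pass followed by cutting the sorted index list into runs of equal characters, so the dict is assembled once with its keys already in order.
import Mathlib
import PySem

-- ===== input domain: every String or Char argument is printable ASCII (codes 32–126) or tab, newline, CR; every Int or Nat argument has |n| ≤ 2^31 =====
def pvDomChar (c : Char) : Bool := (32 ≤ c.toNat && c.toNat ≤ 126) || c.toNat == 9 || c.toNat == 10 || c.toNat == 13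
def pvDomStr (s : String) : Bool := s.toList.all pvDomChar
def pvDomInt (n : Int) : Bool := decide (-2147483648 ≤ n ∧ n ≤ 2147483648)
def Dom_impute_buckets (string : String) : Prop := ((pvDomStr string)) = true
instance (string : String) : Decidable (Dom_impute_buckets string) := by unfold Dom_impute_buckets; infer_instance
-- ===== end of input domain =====

-- B replaces A's build-dict-by-appending-then-sort-keys strategy with a stable sort of all
-- indices by character followed by cutting the sorted index list into runs (alternative algorithm).


-- ===== PORT A =====
-- Python's branch "if k in buckets: buckets[k].append(i) else: buckets[k] = [i]" is exactly
-- Dict.modify k [] (· ++ [i]).  sorted(buckets.items()) compares (key, value) tuples; the keys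
-- are distinct, so the values are never compared and it is a sort by the first component.
def impute_buckets (string : String) : List (String × List Int) :=
  let buckets := (PySem.List.enumerate string.toList).foldl
      (fun d p => d.modify (String.singleton p.2) [] (fun v => v ++ [p.1])) PySem.Dict.empty
  PySem.List.sorted buckets.items (fun p => p.1) false

-- ===== PORT B =====
-- one iteration of Source B's grouping loop: append i to the last group if its key is string[i],
-- else start a new group (string[i] is a 1-character str; its sort order is Char order)
def pvStep (cs : List Char) (gs : List (String × List Int)) (i : Int) : List (String × List Int) :=
  let c := String.singleton (PySem.List.pyGetD cs i ' ')
  match gs.getLast? with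
  | some kv => if kv.1 == c then gs.dropLast ++ [(kv.1, kv.2 ++ [i])] else gs ++ [(c, [i])]
  | none => [(c, [i])]

def impute_buckets_alt (string : String) : List (String × List Int) :=
  let cs := string.toList
  let order := PySem.List.sorted (PySem.List.pyRange 0 (PySem.Str.len string) 1)
      (fun i => PySem.List.pyGetD cs i ' ') false
  let groups := order.foldl (pvStep cs) []
  (PySem.Dict.ofList groups).items

-- ===== PRECONDITION & SPEC =====
def Spec_impute_buckets (string : String) (out : List (String × List Int)) : Prop := out = impute_buckets_alt string
instance (string : String) (out : List (String × List Int)) : Decidable (Spec_impute_buckets string out) := by unfold Spec_impute_buckets; infer_instance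

-- ===== CLAIM (what is proved, stated in full; the proofs are below) =====
def Claim_equal_impute_buckets : Prop := ∀ (string : String), Dom_impute_buckets string → Spec_impute_buckets string (impute_buckets string)

-- ===== LEMMAS AND PROOFS =====

-- the canonical value both programs compute: for each character (in sorted order, as pvKeys)
-- the ascending list of positions holding it
def pvIdx (cs : List Char) (c : Char) : List Int :=
  ((List.range cs.length).filter (fun k => cs.getD k ' ' == c)).map (fun (k : Nat) => (k : Int))

def pvKeys (cs : List Char) : List Char :=
  PySem.List.sorted (PySem.Set.ofList cs) (fun c => c) false

theorem singleton_inj : Function.Injective String.singleton := by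
  intro a b h
  have := congrArg String.toList h
  simpa [String.toList_singleton] using this

theorem singleton_lt {a b : Char} (h : a < b) : String.singleton a < String.singleton b := by
  rw [String.lt_iff_toList_lt]
  simp only [String.toList_singleton]
  exact List.Lex.rel h

theorem singleton_beq (a b : Char) :
    (String.singleton a == String.singleton b) = (a == b) := by
  by_cases h : a = b
  · simp [h]
  · have h2 : ¬ String.singleton a = String.singleton b := fun hs => h (singleton_inj hs)
    simp [h, h2]

theorem insertBy_all_true {α : Type} (bfr : α → α → Bool) (x : α) (l : List α)
    (h : ∀ a ∈ l, bfr x a = true) : PySem.List.insertBy bfr x l = x :: l := by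
  cases l with
  | nil => rfl
  | cons y ys => simp [PySem.List.insertBy, h y (by simp)]

theorem insertBy_append_false {α : Type} (bfr : α → α → Bool) (x : α) (as bs : List α)
    (h : ∀ a ∈ as, bfr x a = false) :
    PySem.List.insertBy bfr x (as ++ bs) = as ++ PySem.List.insertBy bfr x bs := by
  induction as with
  | nil => rfl
  | cons a as ih =>
      simp only [List.cons_append, PySem.List.insertBy, h a (by simp)]
      simp [ih (fun a ha => h a (by simp [ha]))]

-- inserting x into a concatenation of blocks with strictly increasing keys, key of x present
theorem insert_flatMap_mem {κ α : Type} [LinearOrder κ] (kf : α → κ)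
    (C : List κ) (I : κ → List α) (x : α)
    (hC : C.Pairwise (· < ·)) (hI : ∀ c ∈ C, ∀ y ∈ I c, kf y = c) (hx : kf x ∈ C) :
    PySem.List.insertBy (fun a b => decide (kf a < kf b)) x (C.flatMap I)
      = C.flatMap (fun c => I c ++ if c = kf x then [x] else []) := by
  induction C with
  | nil => simp at hx
  | cons c C ih =>
      rcases List.pairwise_cons.mp hC with ⟨hhead, htail⟩
      simp only [List.flatMap_cons]
      rcases List.mem_cons.mp hx with hq | hq
      · -- kf x = c : x goes to the end of the first block
        rw [insertBy_append_false _ _ _ _ (fun a ha => by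
              simp [hI c (by simp) a ha, ← hq])]
        rw [insertBy_all_true _ _ _ (fun a ha => by
              rcases List.mem_flatMap.mp ha with ⟨c', hc', ha'⟩
              simp only [hI c' (by simp [hc']) a ha', decide_eq_true_eq]
              exact hq ▸ hhead c' hc')]
        rw [List.flatMap_congr (l := C) (f := fun c' => I c' ++ if c' = kf x then [x] else [])
              (g := I) (fun c' hc' => by
              have : ¬ c' = kf x := fun he => absurd (hq ▸ he ▸ hhead c' hc') (lt_irrefl _)
              simp [this])]
        simp [← hq]
      · -- kf x lies in a later block
        have hcx : c < kf x := hhead _ hq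
        rw [insertBy_append_false _ _ _ _ (fun a ha => by
              simp [hI c (by simp) a ha, not_lt_of_gt hcx])]
        rw [ih htail (fun c' hc' => hI c' (by simp [hc'])) hq]
        have hne : ¬ c = kf x := fun he => absurd (he ▸ hcx) (lt_irrefl _)
        simp [hne]

-- inserting x whose key is absent: the key slots into sorted position with block [x]
theorem insert_flatMap_not_mem {κ α : Type} [LinearOrder κ] (kf : α → κ)
    (C : List κ) (I : κ → List α) (x : α)
    (hC : C.Pairwise (· < ·)) (hI : ∀ c ∈ C, ∀ y ∈ I c, kf y = c) (hx : kf x ∉ C) :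
    PySem.List.insertBy (fun a b => decide (kf a < kf b)) x (C.flatMap I)
      = (PySem.List.insertBy (fun a b => decide (a < b)) (kf x) C).flatMap
          (fun c => if c = kf x then [x] else I c) := by
  induction C with
  | nil => simp [PySem.List.insertBy]
  | cons c C ih =>
      rcases List.pairwise_cons.mp hC with ⟨hhead, htail⟩
      have hne : ¬ kf x = c := fun he => hx (by simp [he])
      simp only [List.flatMap_cons]
      by_cases hlt : kf x < c
      · -- new key is smallest so far: x becomes a new first block
        rw [insertBy_all_true _ _ _ (fun a ha => by
              rcases List.mem_append.mp ha with ha | ha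
              · simp only [hI c (by simp) a ha, decide_eq_true_eq]; exact hlt
              · rcases List.mem_flatMap.mp ha with ⟨c', hc', ha'⟩
                simp only [hI c' (by simp [hc']) a ha', decide_eq_true_eq]
                exact lt_trans hlt (hhead c' hc'))]
        rw [show PySem.List.insertBy (fun a b => decide (a < b)) (kf x) (c :: C)
              = kf x :: c :: C by simp [PySem.List.insertBy, hlt]]
        simp only [List.flatMap_cons]
        rw [List.flatMap_congr (l := C) (f := fun c' => if c' = kf x then [x] else I c')
              (g := I) (fun c' hc' => by
              have : ¬ c' = kf x := fun he => hx (by simp [← he, hc'])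
              simp [this])]
        simp [Ne.symm hne]
      · -- new key comes after the first block
        have hgt : c < kf x := lt_of_le_of_ne (not_lt.mp hlt) (fun he => hne he.symm)
        rw [insertBy_append_false _ _ _ _ (fun a ha => by
              simp [hI c (by simp) a ha, hlt])]
        rw [ih htail (fun c' hc' => hI c' (by simp [hc'])) (fun hmem => hx (by simp [hmem]))]
        rw [show PySem.List.insertBy (fun a b => decide (a < b)) (kf x) (c :: C)
              = c :: PySem.List.insertBy (fun a b => decide (a < b)) (kf x) C by
              simp [PySem.List.insertBy, hlt]]
        simp [Ne.symm hne]

theorem sorted_snoc {κ α : Type} [LT κ] [DecidableLT κ] (xs : List α) (x : α) (kf : α → κ) :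
    PySem.List.sorted (xs ++ [x]) kf false
      = PySem.List.insertBy (fun a b => decide (kf a < kf b)) x (PySem.List.sorted xs kf false) := by
  rw [PySem.List.sorted_eq_foldl_insertBy, PySem.List.sorted_eq_foldl_insertBy, List.foldl_append]
  rfl

-- stable sort = sorted distinct keys, each key replaced by the filter of its elements
theorem sorted_eq_flatMap_filter {κ α : Type} [LinearOrder κ] [BEq κ] [LawfulBEq κ]
    (xs : List α) (kf : α → κ) :
    PySem.List.sorted xs kf false
      = (PySem.List.sorted (PySem.Set.ofList (xs.map kf)) (fun c => c) false).flatMap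
          (fun c => xs.filter (fun a => kf a == c)) := by
  induction xs using List.reverseRecOn with
  | nil => rfl
  | append_singleton xs x ih =>
      rw [sorted_snoc, ih, List.map_append, List.map_singleton, PySem.Set.ofList_append_singleton]
      have hC := PySem.List.sorted_ofList_pairwise_lt (xs.map kf)
      have hI : ∀ c ∈ PySem.List.sorted (PySem.Set.ofList (xs.map kf)) (fun c => c) false,
          ∀ y ∈ xs.filter (fun a => kf a == c), kf y = c := fun c _ y hy => by
        simpa using (List.mem_filter.mp hy).2
      by_cases hmem : kf x ∈ PySem.Set.ofList (xs.map kf)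
      · have hadd : (PySem.Set.ofList (xs.map kf)).add (kf x) = PySem.Set.ofList (xs.map kf) := by
          simp [PySem.Set.add, PySem.Set.contains, List.contains_eq_mem, hmem]
        rw [hadd]
        rw [insert_flatMap_mem kf _ _ x hC hI
              (by rw [PySem.List.mem_sorted]; exact hmem)]
        refine List.flatMap_congr (fun c hc => ?_)
        rw [List.filter_append]
        by_cases hce : c = kf x
        · simp [hce]
        · have h2 : ¬ kf x = c := fun he => hce he.symm
          simp [hce, h2]
      · have hadd : (PySem.Set.ofList (xs.map kf)).add (kf x) = PySem.Set.ofList (xs.map kf) ++ [kf x] := by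
          have : (PySem.Set.ofList (xs.map kf)).contains (kf x) = false := by
            simp [PySem.Set.contains, List.contains_eq_mem, hmem]
          simp only [PySem.Set.add, this, Bool.false_eq_true, if_false]
        rw [hadd]
        rw [insert_flatMap_not_mem kf _ _ x hC hI
              (by rw [PySem.List.mem_sorted]; exact hmem)]
        rw [show PySem.List.sorted (PySem.Set.ofList (xs.map kf) ++ [kf x]) (fun c => c) false
              = PySem.List.insertBy (fun a b => decide (a < b)) (kf x)
                  (PySem.List.sorted (PySem.Set.ofList (xs.map kf)) (fun c => c) false) from
              sorted_snoc _ _ _]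
        refine List.flatMap_congr (fun c hc => ?_)
        rw [List.filter_append]
        by_cases hce : c = kf x
        · simp only [hce, List.filter_cons, beq_self_eq_true, if_pos trivial,
            List.filter_nil]
          rw [show xs.filter (fun a => kf a == kf x) = [] from List.filter_eq_nil_iff.mpr
                (fun a ha hbeq => hmem (by
                  rw [PySem.Set.mem_ofList]
                  exact (by simpa using hbeq : kf a = kf x) ▸ List.mem_map_of_mem ha))]
          simp
        · have h2 : ¬ kf x = c := fun he => hce he.symm
          simp [hce, h2]

-- grouping run lemma: processing a block whose elements all carry key k extends the last group
theorem foldl_step_block (cs : List Char) (is : List Int) (k : String) (v : List Int)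
    (A0 : List (String × List Int))
    (h : ∀ i ∈ is, String.singleton (PySem.List.pyGetD cs i ' ') = k) :
    is.foldl (pvStep cs) (A0 ++ [(k, v)]) = A0 ++ [(k, v ++ is)] := by
  induction is generalizing v with
  | nil => simp
  | cons i is ih =>
      rw [List.foldl_cons]
      rw [show pvStep cs (A0 ++ [(k, v)]) i = A0 ++ [(k, v ++ [i])] from by
        simp [pvStep, h i (by simp)]]
      rw [ih (v ++ [i]) (fun j hj => h j (by simp [hj]))]
      simp

theorem foldl_step_new (cs : List Char) (i : Int) (is : List Int) (k : String)
    (A0 : List (String × List Int))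
    (h : ∀ j ∈ i :: is, String.singleton (PySem.List.pyGetD cs j ' ') = k)
    (h0 : ∀ p, A0.getLast? = some p → p.1 ≠ k) :
    (i :: is).foldl (pvStep cs) A0 = A0 ++ [(k, i :: is)] := by
  rw [List.foldl_cons]
  rw [show pvStep cs A0 i = A0 ++ [(k, [i])] from by
    unfold pvStep
    cases hL : A0.getLast? with
    | none => simp [List.getLast?_eq_none_iff.mp hL, h i (by simp)]
    | some p =>
        have hb : (p.1 == k) = false := by
          simp only [beq_eq_false_iff_ne, ne_eq]; exact h0 p hL
        simp [h i (by simp), hb]]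
  rw [foldl_step_block cs is k [i] A0 (fun j hj => h j (by simp [hj]))]
  simp

theorem foldl_step_flatMap (cs : List Char) (C : List Char) (I : Char → List Int)
    (A0 : List (String × List Int)) (hnd : C.Nodup)
    (hne : ∀ c ∈ C, I c ≠ [])
    (hkey : ∀ c ∈ C, ∀ i ∈ I c, String.singleton (PySem.List.pyGetD cs i ' ') = String.singleton c)
    (h0 : ∀ c ∈ C, ∀ p, A0.getLast? = some p → p.1 ≠ String.singleton c) :
    (C.flatMap I).foldl (pvStep cs) A0
      = A0 ++ C.map (fun c => (String.singleton c, I c)) := by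
  induction C generalizing A0 with
  | nil => simp
  | cons c C ih =>
      simp only [List.flatMap_cons, List.foldl_append]
      obtain ⟨i, is, hcis⟩ := List.exists_cons_of_ne_nil (hne c (by simp))
      rw [hcis, foldl_step_new cs i is (String.singleton c) A0
            (fun j hj => hkey c (by simp) j (hcis ▸ hj))
            (fun p hp => h0 c (by simp) p hp)]
      rw [← hcis, ih (A0 ++ [(String.singleton c, I c)]) (List.nodup_cons.mp hnd).2
            (fun c' hc' => hne c' (by simp [hc']))
            (fun c' hc' => hkey c' (by simp [hc']))
            (fun c' hc' p hp => by
              rw [List.getLast?_concat] at hp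
              cases hp
              intro he
              exact (List.nodup_cons.mp hnd).1
                (by rw [singleton_inj he]; exact hc'))]
      simp [hcis]

theorem enumerate_eq_map_range (xs : List Char) : ∀ (s : Nat),
    PySem.List.enumerate xs (s : Int)
      = (List.range xs.length).map (fun k => (((s + k : Nat) : Int), xs.getD k ' ')) := by
  induction xs with
  | nil => intro s; rfl
  | cons x xs ih =>
      intro s
      rw [PySem.List.enumerate_cons,
          show ((s : Int) + 1) = ((s + 1 : Nat) : Int) by push_cast; ring, ih (s + 1),
          List.length_cons, List.range_succ_eq_map]
      simp only [List.map_cons, List.map_map, Nat.add_zero, List.getD_cons_zero, List.cons.injEq]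
      refine ⟨by simp, List.map_congr_left (fun k _ => ?_)⟩
      simp only [Function.comp, Nat.succ_eq_add_one, List.getD_cons_succ, Prod.mk.injEq]
      exact ⟨by push_cast; ring, trivial⟩

theorem ofList_map {α β : Type} [BEq α] [LawfulBEq α] [BEq β] [LawfulBEq β]
    (f : α → β) (hf : Function.Injective f) (xs : List α) :
    PySem.Set.ofList (xs.map f) = (PySem.Set.ofList xs).map f := by
  suffices h : ∀ acc : List α,
      (xs.map f).foldl PySem.Set.add (acc.map f) = (xs.foldl PySem.Set.add acc).map f by
    exact h []
  induction xs with
  | nil => intro acc; rfl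
  | cons x xs ih =>
      intro acc
      simp only [List.map_cons, List.foldl_cons]
      rw [show PySem.Set.add (acc.map f) (f x) = (PySem.Set.add acc x).map f by
        by_cases hm : x ∈ acc
        · simp [PySem.Set.add, PySem.Set.contains, hm]
          exact ⟨x, hm, rfl⟩
        · simp [PySem.Set.add, PySem.Set.contains, hm]
          exact fun a ha he => hm ((hf he) ▸ ha)]
      exact ih (PySem.Set.add acc x)

theorem sorted_set_map_singleton (cs : List Char) :
    PySem.List.sorted (PySem.Set.ofList (cs.map String.singleton)) (fun k => k) false
      = (pvKeys cs).map String.singleton := by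
  rw [ofList_map String.singleton singleton_inj]
  apply PySem.List.sorted_eq_of_perm_of_pairwise_lt
  · exact (PySem.List.sorted_perm _ _ _).map _
  · exact List.Pairwise.map _ (fun a b h => singleton_lt h)
      (PySem.List.sorted_ofList_pairwise_lt cs)

theorem lemA (s : String) :
    impute_buckets s
      = (pvKeys s.toList).map (fun c => (String.singleton c, pvIdx s.toList c)) := by
  have hfold :
      (PySem.List.enumerate s.toList).foldl
        (fun d p => d.modify (String.singleton p.2) [] (fun v => v ++ [p.1]))
        (PySem.Dict.empty : PySem.Dict String (List Int))
      = ((PySem.List.enumerate s.toList).map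
          (fun p : Int × Char => (String.singleton p.2, p.1))).foldl
          (fun d q => d.modify q.1 [] (fun v => v ++ [q.2])) PySem.Dict.empty := by
    rw [List.foldl_map]
  have hmapfst : ((PySem.List.enumerate s.toList).map
          (fun p : Int × Char => (String.singleton p.2, p.1))).map (fun q => q.1)
      = s.toList.map String.singleton := by
    rw [List.map_map, show ((fun q : String × Int => q.1) ∘
          fun p : Int × Char => (String.singleton p.2, p.1))
          = (String.singleton ∘ fun p : Int × Char => p.2) from rfl, ← List.map_map,
        PySem.List.map_snd_enumerate]
  have hkeys : ((PySem.List.enumerate s.toList).foldl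
        (fun d p => d.modify (String.singleton p.2) [] (fun v => v ++ [p.1]))
        (PySem.Dict.empty : PySem.Dict String (List Int))).keys
      = PySem.Set.ofList (s.toList.map String.singleton) := by
    rw [hfold, PySem.Dict.keys_foldl_modify_key _ (fun q : String × Int => q.1) [] _ _,
        hmapfst, PySem.Dict.keys_empty]
    rfl
  have hnd : ((PySem.List.enumerate s.toList).foldl
        (fun d p => d.modify (String.singleton p.2) [] (fun v => v ++ [p.1]))
        (PySem.Dict.empty : PySem.Dict String (List Int))).keys.Nodup := by
    rw [hfold]
    exact PySem.Dict.nodup_keys_foldl_modify_key _ (fun q : String × Int => q.1) [] _ _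
      (by simp [PySem.Dict.keys_empty])
  have hgetD : ∀ k, ((PySem.List.enumerate s.toList).foldl
        (fun d p => d.modify (String.singleton p.2) [] (fun v => v ++ [p.1]))
        (PySem.Dict.empty : PySem.Dict String (List Int))).getD k []
      = (((PySem.List.enumerate s.toList).map
          (fun p : Int × Char => (String.singleton p.2, p.1))).filter
          (fun q => q.1 == k)).map (fun q => q.2) := by
    intro k
    rw [hfold, PySem.Dict.getD_foldl_modify_append _ PySem.Dict.empty k,
        PySem.Dict.getD_empty, List.nil_append]
  have hidx : ∀ c : Char, (((PySem.List.enumerate s.toList).map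
          (fun p : Int × Char => (String.singleton p.2, p.1))).filter
          (fun q => q.1 == String.singleton c)).map (fun q => q.2)
      = pvIdx s.toList c := by
    intro c
    rw [List.filter_map, List.map_map]
    have h1 : ((fun q : String × Int => q.1 == String.singleton c) ∘
          fun p : Int × Char => (String.singleton p.2, p.1))
        = fun p : Int × Char => p.2 == c := by
      funext p; exact singleton_beq p.2 c
    rw [h1, show ((fun q : String × Int => q.2) ∘
          fun p : Int × Char => (String.singleton p.2, p.1))
          = (fun p : Int × Char => p.1) from rfl]
    rw [show PySem.List.enumerate s.toList = PySem.List.enumerate s.toList ((0 : Nat) : Int) by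
          norm_num,
        enumerate_eq_map_range s.toList 0, List.filter_map, List.map_map]
    unfold pvIdx
    simp [Function.comp_def]
  -- assemble
  unfold impute_buckets
  show PySem.List.sorted
      ((PySem.List.enumerate s.toList).foldl
        (fun d p => d.modify (String.singleton p.2) [] (fun v => v ++ [p.1]))
        (PySem.Dict.empty : PySem.Dict String (List Int))).items (fun p => p.1) false
    = (pvKeys s.toList).map (fun c => (String.singleton c, pvIdx s.toList c))
  rw [PySem.Dict.items_eq_map_keys _ hnd [], hkeys]
  have hmaps : (PySem.Set.ofList (s.toList.map String.singleton)).map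
        (fun k => (k, (((PySem.List.enumerate s.toList).foldl
          (fun d p => d.modify (String.singleton p.2) [] (fun v => v ++ [p.1]))
          (PySem.Dict.empty : PySem.Dict String (List Int))).getD k [])))
      = (PySem.Set.ofList (s.toList.map String.singleton)).map
        (fun k => (k, (((PySem.List.enumerate s.toList).map
          (fun p : Int × Char => (String.singleton p.2, p.1))).filter
          (fun q => q.1 == k)).map (fun q => q.2))) :=
    List.map_congr_left (fun k _ => by rw [hgetD k])
  rw [hmaps]
  rw [PySem.List.sorted_eq_of_perm_of_pairwise_lt _
        (((pvKeys s.toList).map String.singleton).map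
          (fun k => (k, (((PySem.List.enumerate s.toList).map
            (fun p : Int × Char => (String.singleton p.2, p.1))).filter
            (fun q => q.1 == k)).map (fun q => q.2))))
        (fun p => p.1)
        (List.Perm.map _ (by rw [← sorted_set_map_singleton]
                             exact PySem.List.sorted_perm _ _ _))
        (List.Pairwise.map _ (fun a b h => h)
          (by rw [← sorted_set_map_singleton]
              exact PySem.List.sorted_ofList_pairwise_lt _))]
  rw [List.map_map]
  exact List.map_congr_left (fun c _ => by
    simp only [Function.comp_apply]
    exact congrArg (fun v => (String.singleton c, v)) (hidx c))

theorem map_getD_range (l : List Char) (d : Char) :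
    (List.range l.length).map (fun k => l.getD k d) = l := by
  apply List.ext_getElem (by simp)
  intro n h1 h2
  simp only [List.getElem_map, List.getElem_range]
  rw [List.getD_eq_getElem?_getD, List.getElem?_eq_getElem h2]
  rfl

theorem lemB (s : String) :
    impute_buckets_alt s
      = (pvKeys s.toList).map (fun c => (String.singleton c, pvIdx s.toList c)) := by
  have hR : PySem.List.pyRange 0 (PySem.Str.len s) 1
      = List.map (fun (k : Nat) => (k : Int)) (List.range s.toList.length) := by
    rw [PySem.Str.len_eq]; exact PySem.List.pyRange_zero_nat _
  have hmapg : (PySem.List.pyRange 0 (PySem.Str.len s) 1).map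
        (fun i => PySem.List.pyGetD s.toList i ' ') = s.toList := by
    rw [hR, List.map_map]
    rw [show ((fun i => PySem.List.pyGetD s.toList i ' ') ∘ fun k : Nat => (k : Int))
          = fun k : Nat => s.toList.getD k ' ' by
        funext k; exact PySem.List.pyGetD_natCast _ k _]
    exact map_getD_range _ _
  have horder : PySem.List.sorted (PySem.List.pyRange 0 (PySem.Str.len s) 1)
        (fun i => PySem.List.pyGetD s.toList i ' ') false
      = (pvKeys s.toList).flatMap (fun c => (PySem.List.pyRange 0 (PySem.Str.len s) 1).filter
          (fun i => PySem.List.pyGetD s.toList i ' ' == c)) := by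
    rw [sorted_eq_flatMap_filter, hmapg]
    rfl
  have hIc : ∀ c : Char, (PySem.List.pyRange 0 (PySem.Str.len s) 1).filter
        (fun i => PySem.List.pyGetD s.toList i ' ' == c) = pvIdx s.toList c := by
    intro c
    rw [hR, List.filter_map]
    rw [show ((fun i => PySem.List.pyGetD s.toList i ' ' == c) ∘ fun k : Nat => (k : Int))
          = fun k : Nat => s.toList.getD k ' ' == c by
        funext k; rw [Function.comp_apply, PySem.List.pyGetD_natCast]]
    unfold pvIdx
    rfl
  have hknd : (pvKeys s.toList).Nodup :=
    (PySem.List.sorted_ofList_pairwise_lt _).imp (fun h => ne_of_lt h)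
  have hgrp : ((pvKeys s.toList).flatMap (fun c => (PySem.List.pyRange 0 (PySem.Str.len s) 1).filter
          (fun i => PySem.List.pyGetD s.toList i ' ' == c))).foldl (pvStep s.toList) []
      = (pvKeys s.toList).map (fun c => (String.singleton c,
          (PySem.List.pyRange 0 (PySem.Str.len s) 1).filter
            (fun i => PySem.List.pyGetD s.toList i ' ' == c))) := by
    rw [foldl_step_flatMap s.toList _ _ [] hknd
          (fun c hc => ?hne) (fun c hc i hi => ?hkey) (fun c hc p hp => by simp at hp)]
    · simp
    case hkey =>
      exact congrArg String.singleton (by simpa using (List.mem_filter.mp hi).2)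
    case hne =>
      have hcs : c ∈ s.toList := by
        have := (PySem.List.mem_sorted _ _ _ c).mp hc
        rwa [PySem.Set.mem_ofList] at this
      obtain ⟨k, hk, hek⟩ := List.mem_iff_getElem.mp hcs
      rw [hIc c]
      intro hnil
      have hkmem : k ∈ (List.range s.toList.length).filter
          (fun k => s.toList.getD k ' ' == c) := by
        rw [List.mem_filter]
        refine ⟨List.mem_range.mpr hk, ?_⟩
        rw [List.getD_eq_getElem?_getD, List.getElem?_eq_getElem hk]
        simpa using hek
      have : ((k : Int)) ∈ pvIdx s.toList c := by
        unfold pvIdx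
        exact List.mem_map_of_mem (f := fun k : Nat => (k : Int)) hkmem
      rw [hnil] at this
      simp at this
  have hofl : (PySem.Dict.ofList ((pvKeys s.toList).map
        (fun c => (String.singleton c, pvIdx s.toList c)))).items
      = (pvKeys s.toList).map (fun c => (String.singleton c, pvIdx s.toList c)) := by
    show (List.foldl (fun (acc : PySem.Dict String (List Int)) (p : String × List Int) =>
        acc.insert p.1 p.2) PySem.Dict.empty _).items = _
    rw [PySem.Dict.items_foldl_insert_fresh _ (fun p : String × List Int => p.1)
          (fun p => p.2) _ (fun a _ => PySem.Dict.contains_empty _)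
          (by rw [List.map_map]
              exact List.Nodup.map (fun a b he => singleton_inj he) hknd)]
    simp [show (PySem.Dict.empty : PySem.Dict String (List Int)).items = [] from rfl,
      Function.comp_def]
  unfold impute_buckets_alt
  show (PySem.Dict.ofList ((PySem.List.sorted (PySem.List.pyRange 0 (PySem.Str.len s) 1)
        (fun i => PySem.List.pyGetD s.toList i ' ') false).foldl (pvStep s.toList) [])).items
    = (pvKeys s.toList).map (fun c => (String.singleton c, pvIdx s.toList c))
  rw [horder, hgrp, List.map_congr_left (fun c _ => by rw [hIc c] :
        ∀ c ∈ pvKeys s.toList, _ = _), hofl]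

-- ===== VERDICT (by name: the statement is the Claim_ definition above) =====
theorem impute_buckets_spec : Claim_equal_impute_buckets := by
  intro s _
  unfold Spec_impute_buckets
  rw [lemA, lemB]
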